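-- pv_equiv track=rewrite | github.com/vader-31/MealSense | 06_health_scoring.py | streak
-- ===== SOURCE A (Python) =====
-- def streak(series):
--     """Current streak (from end) and longest streak in a boolean series."""
--     vals = list(series)
--     cur = 0
--     for v in reversed(vals):
--         if v: cur += 1
--         else: break
--     longest, run = 0, 0
--     for v in vals:
--         run = run + 1 if v else 0
--         longest = max(longest, run)
--     return cur, longest
-- ===== SOURCE B (Python) =====
-- def streak(series):
--     """Current streak (from end) and longest streak, in ONE forward pass:
--     the final `run` is exactly the trailing streak, so the reversed scan is unneeded."""
--     run = 0
--     longest = 0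
--     for v in series:
--         run = run + 1 if v else 0
--         longest = max(longest, run)
--     return run, longest
-- ===== Notes on version B (the rewrite author's own statement) =====
-- stated objective: simpler
-- what changed: Single forward pass maintaining run/longest; the current streak is read off as the final run, eliminating A's separate reversed break-loop.
import Mathlib
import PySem

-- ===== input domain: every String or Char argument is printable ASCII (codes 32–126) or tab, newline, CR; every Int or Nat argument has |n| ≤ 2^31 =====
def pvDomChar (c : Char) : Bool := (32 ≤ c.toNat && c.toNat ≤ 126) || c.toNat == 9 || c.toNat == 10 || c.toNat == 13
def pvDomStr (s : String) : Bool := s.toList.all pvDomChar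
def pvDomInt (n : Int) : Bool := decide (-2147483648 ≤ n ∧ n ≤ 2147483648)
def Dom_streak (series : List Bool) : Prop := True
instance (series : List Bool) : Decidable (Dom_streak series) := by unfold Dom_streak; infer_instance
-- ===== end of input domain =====

-- B replaces A's two passes (a reversed break-loop for the current streak plus a forward
-- fold for the longest) by a single forward pass whose final `run` is the current streak. (objective: simpler)

-- ===== PORT A =====
-- the `for v in reversed(vals): if v: cur += 1 else: break` loop, as structural recursion
def streakCurLoop : List Bool → Int
  | [] => 0
  | v :: t => if v then 1 + streakCurLoop t else 0

def streak (series : List Bool) : Int × Int :=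
  let vals := series
  let cur := streakCurLoop vals.reverse
  let p := vals.foldl (fun (p : Int × Int) v =>
            let run := if v then p.2 + 1 else 0
            (max p.1 run, run)) (0, 0)
  (cur, p.1)

-- ===== PORT B =====
def streak_alt (series : List Bool) : Int × Int :=
  let p := series.foldl (fun (p : Int × Int) v =>
            let run := if v then p.1 + 1 else 0
            (run, max p.2 run)) (0, 0)
  (p.1, p.2)

-- ===== PRECONDITION & SPEC =====
def Spec_streak (series : List Bool) (out : Int × Int) : Prop := out = streak_alt series
instance (series : List Bool) (out : Int × Int) : Decidable (Spec_streak series out) := by unfold Spec_streak; infer_instance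

-- ===== CLAIM (what is proved, stated in full; the proofs are below) =====
def Claim_equal_streak : Prop := ∀ (series : List Bool), Dom_streak series → Spec_streak series (streak series)

-- ===== LEMMAS AND PROOFS =====

-- A's fold state (longest, run) is B's fold state (run, longest) swapped, for any start.
theorem streak_fold_swap (xs : List Bool) (l r : Int) :
    xs.foldl (fun (p : Int × Int) v =>
      let run := if v then p.2 + 1 else 0
      (max p.1 run, run)) (l, r)
    = ((xs.foldl (fun (p : Int × Int) v =>
        let run := if v then p.1 + 1 else 0
        (run, max p.2 run)) (r, l)).2,
       (xs.foldl (fun (p : Int × Int) v =>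
        let run := if v then p.1 + 1 else 0
        (run, max p.2 run)) (r, l)).1) := by
  induction xs generalizing l r with
  | nil => simp
  | cons v t ih => simp only [List.foldl]; exact ih _ _

-- the run component of B's fold, started at run = 0, is the trailing true-streak
theorem streak_run_eq (xs : List Bool) :
    ∀ (l : Int),
    (xs.foldl (fun (p : Int × Int) v =>
      let run := if v then p.1 + 1 else 0
      (run, max p.2 run)) (0, l)).1
    = streakCurLoop xs.reverse := by
  induction xs using List.reverseRecOn with
  | nil => intro l; simp [streakCurLoop]
  | append_singleton t v ih =>
    intro l
    rw [List.foldl_append, List.reverse_append]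
    cases v
    · simp [streakCurLoop]
    · simp only [List.foldl, List.reverse_cons, List.reverse_nil, List.nil_append,
        List.singleton_append, streakCurLoop]
      rw [ih l]
      simp
      omega

-- ===== VERDICT (by name: the statement is the Claim_ definition above) =====
theorem streak_spec : Claim_equal_streak := by
  intro series _
  unfold Spec_streak streak streak_alt
  simp only
  rw [streak_fold_swap]
  rw [streak_run_eq series 0]
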